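-- pv_equiv track=rewrite | github.com/chemin-du-business/cdb-produit-ia | old_scripts/pipeline/diversity.py | apply_category_diversity
-- ===== SOURCE A (Python) =====
-- from typing import Any, Dict, List
--
-- def apply_category_diversity(items_sorted: List[Dict[str, Any]], max_per_category: int = 3) -> List[Dict[str, Any]]:
--     counts = {}
--     out = []
--
--     for item in items_sorted:
--         cat = (item.get("category") or "autre").lower()
--         counts.setdefault(cat, 0)
--
--         if counts[cat] >= max_per_category:
--             continue
--
--         out.append(item)
--         counts[cat] += 1
--
--     return out
-- ===== SOURCE B (Python) =====
-- def apply_category_diversity(items_sorted, max_per_category=3):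
--     # Stage 1: bucket the indices of items_sorted by normalized category.
--     buckets = {}
--     for i, item in enumerate(items_sorted):
--         cat = (item.get("category") or "autre").lower()
--         buckets.setdefault(cat, []).append(i)
--     # Stage 2: keep the first max(0, max_per_category) indices of each bucket.
--     k = max(0, max_per_category)
--     kept = set()
--     for idxs in buckets.values():
--         kept.update(idxs[:k])
--     # Stage 3: rebuild the list in original order from the kept-index set.
--     return [item for i, item in enumerate(items_sorted) if i in kept]
-- ===== Notes on version B (the rewrite author's own statement) =====
-- stated objective: alternative
-- what changed: Replaces A's single pass with a running per-category counter by three staged passes: bucket item indices per normalized category, keep the first max(0, max_per_category) indices of each bucket in a kept-index set, then rebuild the output by filtering the original list on index membership.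
import Mathlib
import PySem

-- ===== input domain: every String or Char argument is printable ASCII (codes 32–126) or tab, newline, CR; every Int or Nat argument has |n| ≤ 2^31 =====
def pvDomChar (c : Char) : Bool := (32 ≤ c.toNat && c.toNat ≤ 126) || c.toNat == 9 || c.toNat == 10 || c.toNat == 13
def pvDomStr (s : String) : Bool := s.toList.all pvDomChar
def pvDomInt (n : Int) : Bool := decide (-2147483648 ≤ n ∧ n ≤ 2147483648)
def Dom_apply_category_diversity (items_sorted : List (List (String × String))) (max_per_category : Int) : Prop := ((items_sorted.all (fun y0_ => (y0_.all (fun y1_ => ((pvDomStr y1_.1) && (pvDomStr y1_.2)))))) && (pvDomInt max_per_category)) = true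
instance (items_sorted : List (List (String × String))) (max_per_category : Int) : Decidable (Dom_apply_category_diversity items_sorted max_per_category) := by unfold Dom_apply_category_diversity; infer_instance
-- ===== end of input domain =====

-- B replaces A's single counting pass by three staged passes (bucket indices per category,
-- keep the first max(0, max) of each bucket in a set, filter by index); objective: alternative, no speed claim.

-- ===== PORT A =====
-- (item.get("category") or "autre").lower() — shared by both Pythons verbatim
def pvNormCat (it : List (String × String)) : String :=
  PySem.Str.lower
    (match (PySem.Dict.mk it).get? "category" with
     | some s => if s = "" then "autre" else s   -- Python `or`: empty string is falsy
     | none => "autre")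

-- A's for-loop over items with state (counts, out)
def pvALoop (mx : Int) (counts : PySem.Dict String Int) (out : List (List (String × String))) :
    List (List (String × String)) → List (List (String × String))
  | [] => out
  | it :: rest =>
    let cat := pvNormCat it
    let counts1 := counts.setdefault cat 0
    if counts1.getD cat 0 ≥ mx then
      pvALoop mx counts1 out rest
    else
      pvALoop mx (counts1.insert cat (counts1.getD cat 0 + 1)) (out ++ [it]) rest

def apply_category_diversity (items_sorted : List (List (String × String))) (max_per_category : Int) : List (List (String × String)) :=
  pvALoop max_per_category PySem.Dict.empty [] items_sorted

-- ===== PORT B =====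
def apply_category_diversity_alt (items_sorted : List (List (String × String))) (max_per_category : Int) : List (List (String × String)) :=
  -- Stage 1: buckets.setdefault(cat, []).append(i) over enumerate(items_sorted)
  let buckets : PySem.Dict String (List Int) :=
    (PySem.List.enumerate items_sorted 0).foldl
      (fun d p => d.modify (pvNormCat p.2) [] (fun l => l ++ [p.1])) PySem.Dict.empty
  -- Stage 2: k = max(0, max_per_category); kept.update(idxs[:k])  (idxs[:k] with k ≥ 0 is `take`)
  let k : Nat := (max 0 max_per_category).toNat
  let kept : PySem.Set Int :=
    buckets.values.foldl (fun s idxs => PySem.Set.update s (idxs.take k)) PySem.Set.empty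
  -- Stage 3: [item for i, item in enumerate(items_sorted) if i in kept]
  ((PySem.List.enumerate items_sorted 0).filter (fun p => kept.contains p.1)).map (fun p => p.2)

-- ===== PRECONDITION & SPEC =====
def Spec_apply_category_diversity (items_sorted : List (List (String × String))) (max_per_category : Int) (out : List (List (String × String))) : Prop := out = apply_category_diversity_alt items_sorted max_per_category
instance (items_sorted : List (List (String × String))) (max_per_category : Int) (out : List (List (String × String))) : Decidable (Spec_apply_category_diversity items_sorted max_per_category out) := by unfold Spec_apply_category_diversity; infer_instance

-- ===== CLAIM (what is proved, stated in full; the proofs are below) =====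
def Claim_equal_apply_category_diversity : Prop := ∀ (items_sorted : List (List (String × String))) (max_per_category : Int), Dom_apply_category_diversity items_sorted max_per_category → Spec_apply_category_diversity items_sorted max_per_category (apply_category_diversity items_sorted max_per_category)

-- ===== LEMMAS AND PROOFS =====

-- common reference recursion: keep an item iff its category occurred < mx times in `seen`
def pvRef (mx : Int) (seen : List String) :
    List (List (String × String)) → List (List (String × String))
  | [] => []
  | it :: rest =>
    (if ((seen.count (pvNormCat it) : Nat) : Int) < mx then [it] else []) ++
      pvRef mx (seen ++ [pvNormCat it]) rest

lemma pvCount_snoc (x c : String) (s : List String) :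
    List.count x (s ++ [c]) = List.count x s + (if c = x then 1 else 0) := by
  simp [List.count_append, List.count_singleton]

lemma pvSetdefault_getD (d : PySem.Dict String Int) (k c : String) :
    (d.setdefault k 0).getD c 0 = d.getD c 0 := by
  by_cases h : d.contains k = true
  · rw [PySem.Dict.setdefault_of_contains _ _ h]
  · rw [PySem.Dict.setdefault_of_not_contains _ _ (by simpa using h), PySem.Dict.getD_insert]
    split_ifs with hc
    · subst hc; rw [PySem.Dict.getD_of_not_contains _ _ (by simpa using h)]
    · rfl

-- ===== A side: pvALoop = pvRef =====
lemma pvALoop_ref (mx : Int) (items : List (List (String × String))) :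
    ∀ (counts : PySem.Dict String Int) (out : List (List (String × String))) (seen : List String),
    (∀ c, counts.getD c 0 = min ((seen.count c : Nat) : Int) (max mx 0)) →
    pvALoop mx counts out items = out ++ pvRef mx seen items := by
  induction items with
  | nil => intro counts out seen _; simp [pvALoop, pvRef]
  | cons it rest ih =>
    intro counts out seen hinv
    set cat := pvNormCat it with hcat
    have hc1 : ∀ c, (counts.setdefault cat 0).getD c 0 = min ((seen.count c : Nat) : Int) (max mx 0) := by
      intro c; rw [pvSetdefault_getD]; exact hinv c
    have hstep : pvALoop mx counts out (it :: rest) =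
        (if (counts.setdefault cat 0).getD cat 0 ≥ mx then
          pvALoop mx (counts.setdefault cat 0) out rest
        else
          pvALoop mx ((counts.setdefault cat 0).insert cat ((counts.setdefault cat 0).getD cat 0 + 1))
            (out ++ [it]) rest) := rfl
    have href : pvRef mx seen (it :: rest) =
        (if ((seen.count cat : Nat) : Int) < mx then [it] else []) ++
          pvRef mx (seen ++ [cat]) rest := rfl
    by_cases hge : (counts.setdefault cat 0).getD cat 0 ≥ mx
    · have hnk : ¬ (((seen.count cat : Nat) : Int) < mx) := by
        have := hc1 cat; omega
      have hinv' : ∀ c, (counts.setdefault cat 0).getD c 0 =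
          min (((seen ++ [cat]).count c : Nat) : Int) (max mx 0) := by
        intro c
        rw [hc1 c, pvCount_snoc]
        by_cases hcc : c = cat
        · rw [if_pos hcc.symm, hcc]
          push_cast
          omega
        · rw [if_neg (fun h => hcc h.symm)]
          simp
      rw [hstep, if_pos hge, href, if_neg hnk, List.nil_append]
      exact ih _ out (seen ++ [cat]) hinv'
    · have hk : ((seen.count cat : Nat) : Int) < mx := by
        have := hc1 cat; omega
      have hinv' : ∀ c, ((counts.setdefault cat 0).insert cat ((counts.setdefault cat 0).getD cat 0 + 1)).getD c 0 =
          min (((seen ++ [cat]).count c : Nat) : Int) (max mx 0) := by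
        intro c
        rw [PySem.Dict.getD_insert, pvCount_snoc]
        by_cases hcc : c = cat
        · rw [if_pos hcc, if_pos hcc.symm, hcc, hc1 cat]
          push_cast
          omega
        · rw [if_neg hcc, if_neg (fun h => hcc h.symm), hc1 c]
          simp
      rw [hstep, if_neg hge, href, if_pos hk]
      rw [ih _ (out ++ [it]) (seen ++ [cat]) hinv']
      simp

-- ===== B side =====

-- the bucket dict's entry for category c: the indices of items with that category, in order
def pvIdxList (items : List (List (String × String))) (s : Int) (c : String) : List Int :=
  (((PySem.List.enumerate items s).filter (fun p => pvNormCat p.2 == c)).map (fun p => p.1))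

lemma pvBuckets_getD (items : List (List (String × String))) (c : String) :
    ((PySem.List.enumerate items 0).foldl
      (fun d p => d.modify (pvNormCat p.2) [] (fun l => l ++ [p.1])) PySem.Dict.empty).getD c []
    = pvIdxList items 0 c := by
  have h : (PySem.List.enumerate items 0).foldl
      (fun d p => d.modify (pvNormCat p.2) [] (fun l => l ++ [p.1])) PySem.Dict.empty
      = ((PySem.List.enumerate items 0).map (fun p => (pvNormCat p.2, p.1))).foldl
          (fun d q => d.modify q.1 [] (fun l => l ++ [q.2])) PySem.Dict.empty := by
    rw [List.foldl_map]
  rw [h, PySem.Dict.getD_foldl_modify_append]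
  simp [pvIdxList, List.filter_map, List.map_map, Function.comp_def]

-- every index in pvIdxList items s c is s + m for some m < items.length with category c
lemma pvIdxList_mem (items : List (List (String × String))) (s : Int) (c : String) (x : Int)
    (hx : x ∈ pvIdxList items s c) :
    ∃ m : Nat, ∃ _ : m < items.length, x = s + m ∧ pvNormCat items[m] = c := by
  simp only [pvIdxList, List.mem_map, List.mem_filter] at hx
  obtain ⟨p, ⟨hpm, hpc⟩, hx1⟩ := hx
  obtain ⟨m, hm, rfl⟩ := (PySem.List.mem_enumerate_iff items s p).mp hpm
  exact ⟨m, hm, by simpa using hx1.symm, by simpa using hpc⟩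

-- membership in the first k indices of a bucket = prefix-count bound
lemma pvIdxList_take_mem (items : List (List (String × String))) :
    ∀ (s : Int) (c : String) (k : Nat) (j : Nat) (_ : j < items.length),
    ((s + (j : Int)) ∈ (pvIdxList items s c).take k ↔
      (pvNormCat items[j] = c ∧ ((items.map pvNormCat).take j).count c < k)) := by
  induction items with
  | nil => intro s c k j h; simp at h
  | cons it rest ih =>
    intro s c k j hj
    by_cases hc : pvNormCat it = c
    · have hl : pvIdxList (it :: rest) s c = s :: pvIdxList rest (s + 1) c := by
        simp [pvIdxList, PySem.List.enumerate_cons, hc]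
      cases k with
      | zero => simp
      | succ k' =>
        rw [hl, List.take_succ_cons]
        cases j with
        | zero => simp [hc]
        | succ j' =>
          have hj' : j' < rest.length := by simpa using hj
          have hrw : s + ((j' + 1 : Nat) : Int) = (s + 1) + (j' : Int) := by push_cast; ring
          have hne : ¬ ((s + 1) + (j' : Int) = s) := by omega
          rw [List.mem_cons, hrw, ih (s + 1) c k' j' hj']
          simp only [hne, false_or, List.getElem_cons_succ, List.map_cons, List.take_succ_cons]
          simp [hc]
    · have hl : pvIdxList (it :: rest) s c = pvIdxList rest (s + 1) c := by
        simp [pvIdxList, PySem.List.enumerate_cons, hc]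
      rw [hl]
      cases j with
      | zero =>
        simp only [Nat.cast_zero, add_zero]
        constructor
        · intro hmem
          obtain ⟨m, hm, he, _⟩ := pvIdxList_mem rest (s + 1) c s (List.mem_of_mem_take hmem)
          omega
        · rintro ⟨h1, _⟩; exact absurd (by simpa using h1) hc
      | succ j' =>
        have hj' : j' < rest.length := by simpa using hj
        have hrw : s + ((j' + 1 : Nat) : Int) = (s + 1) + (j' : Int) := by push_cast; ring
        rw [hrw, ih (s + 1) c k j' hj']
        simp [hc]

-- membership in the folded kept-set
lemma pvMem_foldl_update (k : Nat) (L : List (List Int)) :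
    ∀ (acc : PySem.Set Int) (x : Int),
    (x ∈ L.foldl (fun s idxs => PySem.Set.update s (idxs.take k)) acc ↔
      x ∈ acc ∨ ∃ l ∈ L, x ∈ l.take k) := by
  induction L with
  | nil => intro acc x; simp
  | cons l rest ih =>
    intro acc x
    rw [List.foldl_cons, ih, PySem.Set.mem_update]
    simp only [List.mem_cons]
    constructor
    · rintro ((h | h) | ⟨l', hl', h⟩)
      · exact Or.inl h
      · exact Or.inr ⟨l, Or.inl rfl, h⟩
      · exact Or.inr ⟨l', Or.inr hl', h⟩
    · rintro (h | ⟨l', (rfl | hl'), h⟩)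
      · exact Or.inl (Or.inl h)
      · exact Or.inl (Or.inr h)
      · exact Or.inr ⟨l', hl', h⟩

-- the generic third pass: filtering enumerate by an index predicate equals pvRef
lemma pvEnumFilter_ref (mx : Int) (items : List (List (String × String))) :
    ∀ (s : Int) (seen : List String) (P : Int → Bool),
    (∀ j : Nat, ∀ _ : j < items.length,
      (P (s + (j : Int)) = true ↔
        (((seen ++ ((items.map pvNormCat).take j)).count (pvNormCat items[j]) : Nat) : Int) < mx)) →
    ((PySem.List.enumerate items s).filter (fun p => P p.1)).map (fun p => p.2) = pvRef mx seen items := by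
  induction items with
  | nil => intro s seen P _; simp [pvRef, PySem.List.enumerate]
  | cons it rest ih =>
    intro s seen P hP
    have h0 := hP 0 (by simp)
    simp only [Nat.cast_zero, add_zero, List.take_zero, List.append_nil] at h0
    have hrest : ∀ j : Nat, ∀ _ : j < rest.length,
        (P ((s + 1) + (j : Int)) = true ↔
          ((((seen ++ [pvNormCat it]) ++ ((rest.map pvNormCat).take j)).count (pvNormCat rest[j]) : Nat) : Int) < mx) := by
      intro j hj
      have h := hP (j + 1) (by simpa using Nat.succ_lt_succ hj)
      push_cast at h
      have hrw : s + ((j : Int) + 1) = (s + 1) + (j : Int) := by ring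
      rw [hrw] at h
      simpa [List.append_assoc] using h
    rw [PySem.List.enumerate_cons, List.filter_cons]
    have href : pvRef mx seen (it :: rest) =
        (if ((seen.count (pvNormCat it) : Nat) : Int) < mx then [it] else []) ++
          pvRef mx (seen ++ [pvNormCat it]) rest := rfl
    by_cases hps : P s = true
    · have hcond : ((seen.count (pvNormCat it) : Nat) : Int) < mx := h0.mp hps
      simp only [hps, if_pos, List.map_cons]
      rw [href, if_pos hcond, ih (s + 1) (seen ++ [pvNormCat it]) P hrest]
      rfl
    · have hcond : ¬ (((seen.count (pvNormCat it) : Nat) : Int) < mx) := fun h => hps (h0.mpr h)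
      simp only [hps]
      rw [if_neg (by simp_all), href, if_neg hcond, List.nil_append]
      exact ih (s + 1) (seen ++ [pvNormCat it]) P hrest

-- kept-set membership for an in-range index = prefix-count bound with k = max(0, mx)
lemma pvKept_contains (items : List (List (String × String))) (mx : Int)
    (j : Nat) (hj : j < items.length) :
    ((((PySem.List.enumerate items 0).foldl
        (fun d p => d.modify (pvNormCat p.2) [] (fun l => l ++ [p.1])) PySem.Dict.empty).values.foldl
        (fun s idxs => PySem.Set.update s (idxs.take (max 0 mx).toNat)) PySem.Set.empty).contains (j : Int) = true
      ↔ ((items.map pvNormCat).take j).count (pvNormCat items[j]) < (max 0 mx).toNat) := by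
  set B := (PySem.List.enumerate items 0).foldl
      (fun d p => d.modify (pvNormCat p.2) [] (fun l => l ++ [p.1])) PySem.Dict.empty with hB
  have hkeys : B.keys = PySem.Set.update (PySem.Dict.empty : PySem.Dict String (List Int)).keys
      ((PySem.List.enumerate items 0).map (fun p => pvNormCat p.2)) :=
    PySem.Dict.keys_foldl_modify_key (PySem.List.enumerate items 0) (fun p => pvNormCat p.2) []
      (fun _ p => fun l => l ++ [p.1]) PySem.Dict.empty
  have hnd : B.keys.Nodup := by
    rw [hkeys]
    exact PySem.Set.nodup_update _ _ (by simp [PySem.Dict.empty])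
  have hvals : B.values = B.keys.map (fun c => B.getD c []) := PySem.Dict.values_eq_map_keys B hnd []
  rw [PySem.Set.contains_iff, pvMem_foldl_update]
  simp only [hvals, List.mem_map, PySem.Set.empty, List.not_mem_nil, false_or]
  constructor
  · rintro ⟨l, ⟨c, _, rfl⟩, hmem⟩
    rw [hB, pvBuckets_getD] at hmem
    have hmem' : ((0 : Int) + (j : Int)) ∈ (pvIdxList items 0 c).take (max 0 mx).toNat := by
      simpa using hmem
    obtain ⟨hc, hcnt⟩ := (pvIdxList_take_mem items 0 c _ j hj).mp hmem'
    rwa [hc]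
  · intro hcnt
    refine ⟨B.getD (pvNormCat items[j]) [], ⟨pvNormCat items[j], ?_, rfl⟩, ?_⟩
    · rw [hkeys, PySem.Set.mem_update]
      refine Or.inr (List.mem_map.mpr ⟨((j : Int), items[j]), ?_, rfl⟩)
      exact (PySem.List.mem_enumerate_iff items 0 _).mpr ⟨j, hj, by simp⟩
    · rw [hB, pvBuckets_getD]
      have := (pvIdxList_take_mem items 0 (pvNormCat items[j]) (max 0 mx).toNat j hj).mpr ⟨rfl, hcnt⟩
      simpa using this

-- ===== VERDICT (by name: the statement is the Claim_ definition above) =====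
theorem apply_category_diversity_spec : Claim_equal_apply_category_diversity := by
  intro items mx _
  unfold Spec_apply_category_diversity apply_category_diversity
  have halt : apply_category_diversity_alt items mx =
      ((PySem.List.enumerate items 0).filter (fun p =>
        (((PySem.List.enumerate items 0).foldl
            (fun d p => d.modify (pvNormCat p.2) [] (fun l => l ++ [p.1])) PySem.Dict.empty).values.foldl
          (fun s idxs => PySem.Set.update s (idxs.take (max 0 mx).toNat)) PySem.Set.empty).contains p.1)).map
        (fun p => p.2) := rfl
  rw [halt, pvALoop_ref mx items PySem.Dict.empty [] []
    (by intro c; simp only [PySem.Dict.getD_empty, List.count_nil, Nat.cast_zero]; omega)]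
  rw [List.nil_append]
  refine (pvEnumFilter_ref mx items 0 [] _ ?_).symm
  intro j hj
  simp only [zero_add, List.nil_append]
  rw [pvKept_contains items mx j hj]
  omega
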